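-- pv_equiv track=rewrite | github.com/mattsmcknight/ai-leetcode | p_equals_np/experimental/structural_approach.py | _is_backdoor
-- ===== SOURCE A (Python) =====
-- import itertools
--
-- def detect_2sat(clauses: list[frozenset[int]]) -> bool:
--     """Detect whether a formula is a 2-SAT instance.
--
--     A formula is 2-SAT if every clause has at most 2 literals.
--     2-SAT is in P (Aspvall-Plass-Tarjan, 1979).
--
--     Args:
--         clauses: Formula in integer-literal representation.
--
--     Returns:
--         True if every clause has at most 2 literals.
--     """
--     return all(len(clause) <= 2 for clause in clauses)
--
-- def detect_horn_sat(clauses: list[frozenset[int]]) -> bool: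
--     """Detect whether a formula is a Horn-SAT instance.
--
--     A formula is Horn if every clause has at most one positive literal.
--     Horn-SAT is in P (Dowling-Gallier, 1984). In our integer-literal
--     convention, positive literals are represented by positive integers.
--
--     Args:
--         clauses: Formula in integer-literal representation.
--
--     Returns:
--         True if every clause has at most one positive literal.
--     """
--     for clause in clauses:
--         positive_count = sum(1 for lit in clause if lit > 0)
--         if positive_count > 1:
--             return False
--     return True
--
-- def _is_backdoor(
--     clauses: list[frozenset[int]],
--     backdoor: set[int],
-- ) -> bool:
--     """Check if a variable set is a backdoor to tractable subclasses.
--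
--     Tests all 2^|backdoor| assignments to the backdoor variables. For each
--     assignment, simplifies the formula and checks if the result is 2-SAT
--     or Horn-SAT.
--
--     Args:
--         clauses: Formula in integer-literal representation.
--         backdoor: Set of variable indices to test.
--
--     Returns:
--         True if every assignment to backdoor yields a tractable formula.
--     """
--     backdoor_list = sorted(backdoor)
--
--     for values in itertools.product((False, True), repeat=len(backdoor_list)):
--         simplified = _simplify_for_assignment(
--             clauses, dict(zip(backdoor_list, values))
--         )
--
--         # Check if simplified formula is tractable
--         if not detect_2sat(simplified) and not detect_horn_sat(simplified):
--             return False
--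
--     return True
--
-- def _simplify_for_assignment(
--     clauses: list[frozenset[int]],
--     assignment: dict[int, bool],
-- ) -> list[frozenset[int]]:
--     """Simplify clauses given a partial assignment.
--
--     Removes satisfied clauses and falsified literals, matching the DPLL
--     simplification semantics.
--
--     Args:
--         clauses: Clause set.
--         assignment: Partial variable assignment.
--
--     Returns:
--         Simplified clause list.
--     """
--     result: list[frozenset[int]] = []
--     for clause in clauses:
--         satisfied = False
--         remaining: set[int] = set()
--         for lit in clause:
--             var = abs(lit)
--             if var in assignment:
--                 lit_true = (lit > 0) == assignment[var]
--                 if lit_true: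
--                     satisfied = True
--                     break
--             else:
--                 remaining.add(lit)
--         if not satisfied:
--             result.append(frozenset(remaining))
--     return result
-- ===== SOURCE B (Python) =====
-- def _is_backdoor(clauses, backdoor):
--     bvars = set(backdoor)
--     not_small = []  # backdoor-literal sets of clauses whose non-backdoor remainder has > 2 literals
--     not_horn = []   # same, for remainders with > 1 positive literal
--     for clause in clauses:
--         blits = frozenset(lit for lit in clause if abs(lit) in bvars)
--         rest = [lit for lit in clause if abs(lit) not in bvars]
--         if len(rest) > 2:
--             not_small.append(blits)
--         if sum(1 for lit in rest if lit > 0) > 1: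
--             not_horn.append(blits)
--     # Some assignment falsifies every backdoor literal of c1 and of c2 iff their union
--     # carries no complementary pair; exactly then that assignment leaves a non-2SAT and
--     # a non-Horn clause simultaneously, i.e. _is_backdoor is False.
--     for s1 in not_small:
--         for s2 in not_horn:
--             u = s1 | s2
--             if all(lit == 0 or -lit not in u for lit in u):
--                 return False
--     return True
-- ===== Notes on version B (the rewrite author's own statement) =====
-- stated objective: alternative
-- what changed: B decides the same property without enumerating the 2^k backdoor assignments: it precomputes each clause's backdoor literals and its non-backdoor remainder's 2SAT/Horn status, and reports failure exactly when some non-2SAT-remainder clause and some non-Horn-remainder clause have backdoor literals whose union contains no complementary pair.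
import Mathlib
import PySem

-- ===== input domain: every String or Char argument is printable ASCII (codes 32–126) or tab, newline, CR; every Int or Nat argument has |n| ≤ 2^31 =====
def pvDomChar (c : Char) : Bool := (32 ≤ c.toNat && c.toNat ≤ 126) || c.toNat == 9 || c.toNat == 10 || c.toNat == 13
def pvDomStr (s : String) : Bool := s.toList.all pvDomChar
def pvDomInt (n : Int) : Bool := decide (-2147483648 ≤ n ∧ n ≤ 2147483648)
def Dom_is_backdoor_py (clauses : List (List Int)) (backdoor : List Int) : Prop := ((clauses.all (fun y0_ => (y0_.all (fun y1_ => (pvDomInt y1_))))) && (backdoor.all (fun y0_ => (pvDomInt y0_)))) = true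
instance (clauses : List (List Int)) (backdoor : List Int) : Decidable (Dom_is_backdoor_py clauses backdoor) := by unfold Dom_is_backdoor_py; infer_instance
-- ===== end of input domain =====

-- B decides the same property by a different algorithm: instead of enumerating the 2^k backdoor
-- assignments, it reports failure exactly when some non-2SAT-remainder clause and some non-Horn-remainder
-- clause have backdoor literals whose union carries no complementary pair (objective: alternative).

-- ===== PORT A =====
-- itertools.product((False, True), repeat=n)
def pvProductBT : Nat → List (List Bool)
  | 0 => [[]]
  | n + 1 => [false, true].flatMap (fun x => (pvProductBT n).map (fun t => x :: t))

-- clauses arrive as Python frozensets: each clause is iterated as its distinct elements, PySem.Set.ofList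
def pvDetect2sat (clauses : List (List Int)) : Bool :=
  clauses.all (fun c => decide (c.length ≤ 2))

def pvDetectHorn : List (List Int) → Bool
  | [] => true
  | c :: rest =>
    if c.countP (fun l => decide (0 < l)) > 1 then false else pvDetectHorn rest

-- the inner loop of _simplify_for_assignment over one clause; none = satisfied (the break)
def pvSimpClause (assign : PySem.Dict Int Bool) : List Int → PySem.Set Int → Option (PySem.Set Int)
  | [], rem => some rem
  | l :: rest, rem =>
    match assign.get? |l| with
    | some b => if (decide (0 < l)) == b then none else pvSimpClause assign rest rem
    | none => pvSimpClause assign rest (PySem.Set.add rem l)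

def pvSimplifyLoop (assign : PySem.Dict Int Bool) : List (List Int) → List (List Int) → List (List Int)
  | [], res => res
  | clause :: rest, res =>
    match pvSimpClause assign (PySem.Set.ofList clause) PySem.Set.empty with
    | none => pvSimplifyLoop assign rest res
    | some rem => pvSimplifyLoop assign rest (res ++ [rem])

def pvSimplify (clauses : List (List Int)) (assign : PySem.Dict Int Bool) : List (List Int) :=
  pvSimplifyLoop assign clauses []

def is_backdoor_py (clauses : List (List Int)) (backdoor : List Int) : Bool :=
  let backdoorList := PySem.List.sorted (PySem.Set.ofList backdoor) (fun x => x) false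
  (pvProductBT backdoorList.length).all (fun values =>
    let simplified := pvSimplify clauses (PySem.Dict.ofList (backdoorList.zip values))
    pvDetect2sat simplified || pvDetectHorn simplified)

-- ===== PORT B =====
-- frozenset(lit for lit in clause if abs(lit) in bvars)
def pvBLits (bvars : PySem.Set Int) (clause : List Int) : PySem.Set Int :=
  PySem.Set.ofList ((PySem.Set.ofList clause).filter (fun l => bvars.contains |l|))

-- [lit for lit in clause if abs(lit) not in bvars]
def pvBRest (bvars : PySem.Set Int) (clause : List Int) : List Int :=
  (PySem.Set.ofList clause).filter (fun l => !(bvars.contains |l|))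

-- the single pass that accumulates not_small and not_horn
def pvAltScan (bvars : PySem.Set Int) : List (List Int) →
    List (PySem.Set Int) → List (PySem.Set Int) → List (PySem.Set Int) × List (PySem.Set Int)
  | [], ns, nh => (ns, nh)
  | clause :: rest, ns, nh =>
    let blits := pvBLits bvars clause
    let r := pvBRest bvars clause
    let ns' := if 2 < r.length then ns ++ [blits] else ns
    let nh' := if 1 < r.countP (fun l => decide (0 < l)) then nh ++ [blits] else nh
    pvAltScan bvars rest ns' nh'

-- all(lit == 0 or -lit not in u for lit in u)
def pvConflictFree (u : PySem.Set Int) : Bool :=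
  u.all (fun l => (l == 0) || !(PySem.Set.contains u (-l)))

def is_backdoor_py_alt (clauses : List (List Int)) (backdoor : List Int) : Bool :=
  let bvars := PySem.Set.ofList backdoor
  let p := pvAltScan bvars clauses [] []
  !(p.1.any (fun s1 => p.2.any (fun s2 => pvConflictFree (PySem.Set.union s1 s2))))

-- ===== PRECONDITION & SPEC =====
def Spec_is_backdoor_py (clauses : List (List Int)) (backdoor : List Int) (out : Bool) : Prop := out = is_backdoor_py_alt clauses backdoor
instance (clauses : List (List Int)) (backdoor : List Int) (out : Bool) : Decidable (Spec_is_backdoor_py clauses backdoor out) := by unfold Spec_is_backdoor_py; infer_instance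

-- ===== CLAIM (what is proved, stated in full; the proofs are below) =====
def Claim_equal_is_backdoor_py : Prop := ∀ (clauses : List (List Int)) (backdoor : List Int), Dom_is_backdoor_py clauses backdoor → Spec_is_backdoor_py clauses backdoor (is_backdoor_py clauses backdoor)

-- ===== LEMMAS AND PROOFS =====

-- proof-only abbreviations for A's per-assignment behaviour
def pvBl (backdoor : List Int) : List Int :=
  PySem.List.sorted (PySem.Set.ofList backdoor) (fun x => x) false

def pvDct (bl : List Int) (vs : List Bool) : PySem.Dict Int Bool :=
  PySem.Dict.ofList (bl.zip vs)

def pvASat (d : PySem.Dict Int Bool) (c : List Int) : Bool :=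
  (PySem.Set.ofList c).any (fun l =>
    match d.get? |l| with
    | some b => (decide (0 < l)) == b
    | none => false)

def pvARest (d : PySem.Dict Int Bool) (c : List Int) : List Int :=
  (PySem.Set.ofList c).filter (fun l => !(d.contains |l|))

-- the falsifying assignment built from a conflict-free literal set
def pvAssignFor (u : PySem.Set Int) (v : Int) : Bool :=
  if u.contains v then (v == 0) else if u.contains (-v) then true else false

theorem pv_mem_productBT (n : Nat) (vs : List Bool) :
    vs ∈ pvProductBT n ↔ vs.length = n := by
  induction n generalizing vs with
  | zero => simp [pvProductBT, List.length_eq_zero_iff]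
  | succ n ih =>
    constructor
    · intro h
      simp only [pvProductBT, List.mem_flatMap, List.mem_map] at h
      rcases h with ⟨x, _, t, ht, rfl⟩
      simp [ih t |>.mp ht]
    · intro h
      cases vs with
      | nil => simp at h
      | cons v tl =>
        simp only [pvProductBT, List.mem_flatMap, List.mem_map]
        refine ⟨v, by cases v <;> simp, tl, (ih tl).mpr (by simpa using h), rfl⟩

theorem pv_simplifyLoop_eq (d : PySem.Dict Int Bool) (cs : List (List Int)) (acc : List (List Int)) :
    pvSimplifyLoop d cs acc = acc ++ cs.filterMap (fun c => pvSimpClause d (PySem.Set.ofList c) PySem.Set.empty) := by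
  induction cs generalizing acc with
  | nil => simp [pvSimplifyLoop]
  | cons c rest ih =>
    cases h : pvSimpClause d (PySem.Set.ofList c) PySem.Set.empty with
    | none =>
      simp only [pvSimplifyLoop, h, ih]
      simp [show pvSimpClause d (PySem.Set.ofList c) [] = none from h]
    | some rem =>
      simp only [pvSimplifyLoop, h, ih]
      simp [show pvSimpClause d (PySem.Set.ofList c) [] = some rem from h]

theorem pv_simplify_eq_filterMap (clauses : List (List Int)) (d : PySem.Dict Int Bool) :
    pvSimplify clauses d =
      clauses.filterMap (fun c => pvSimpClause d (PySem.Set.ofList c) PySem.Set.empty) := by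
  simpa [pvSimplify] using pv_simplifyLoop_eq d clauses []

theorem pv_all_filterMap {α β : Type} (l : List α) (f : α → Option β) (p : β → Bool) :
    (l.filterMap f).all p = l.all (fun x => ((f x).map p).getD true) := by
  induction l with
  | nil => rfl
  | cons x xs ih => cases h : f x <;> simp [h, ih]

theorem pv_detectHorn_eq_all (cs : List (List Int)) :
    pvDetectHorn cs = cs.all (fun c => decide (c.countP (fun l => decide (0 < l)) ≤ 1)) := by
  induction cs with
  | nil => rfl
  | cons c rest ih =>
    simp only [pvDetectHorn, List.all_cons, ih]
    by_cases h : c.countP (fun l => decide (0 < l)) > 1 <;> simp [h] <;> omega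

theorem pv_simpClause_eq (d : PySem.Dict Int Bool) (lits rem : List Int)
    (hn : lits.Nodup) (hfresh : ∀ l ∈ lits, l ∉ rem) :
    pvSimpClause d lits rem =
      if lits.any (fun l => match d.get? |l| with | some b => (decide (0 < l)) == b | none => false)
      then none
      else some (rem ++ lits.filter (fun l => !(d.contains |l|))) := by
  induction lits generalizing rem with
  | nil => simp [pvSimpClause]
  | cons l rest ih =>
    have hcont := PySem.Dict.contains_eq_isSome_get? d |l|
    cases hg : d.get? |l| with
    | some b =>
      have hc : d.contains |l| = true := by rw [hcont, hg]; rfl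
      by_cases hb : ((decide (0 < l)) == b) = true
      · simp [pvSimpClause, hg, hb]
      · have hb' : ((decide (0 < l)) == b) = false := by simpa using hb
        rw [pvSimpClause, hg]
        simp only [hb', Bool.false_eq_true, if_false]
        rw [ih rem hn.of_cons (fun x hx => hfresh x (List.mem_cons_of_mem _ hx))]
        simp [hg, hb', hc]
    | none =>
      have hc : d.contains |l| = false := by rw [hcont, hg]; rfl
      have hlnotin : l ∉ rem := hfresh l (by simp)
      have hadd : PySem.Set.add rem l = rem ++ [l] := by
        simp [PySem.Set.add, hlnotin]
      rw [pvSimpClause, hg, hadd]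
      rw [ih (rem ++ [l]) hn.of_cons ?_]
      · simp [hg, hc]
      · intro x hx
        simp only [List.mem_append, List.mem_singleton]
        rintro (hxr | rfl)
        · exact hfresh x (by simp [hx]) hxr
        · exact (List.nodup_cons.mp hn).1 hx

theorem pv_bridge (d : PySem.Dict Int Bool) (c : List Int) (f : List Int → Bool) :
    ((pvSimpClause d (PySem.Set.ofList c) PySem.Set.empty).map f).getD true
    = (pvASat d c || f (pvARest d c)) := by
  rw [pv_simpClause_eq d _ _ (PySem.Set.nodup_ofList c) (by simp [PySem.Set.empty])]
  unfold pvASat pvARest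
  by_cases h : ((PySem.Set.ofList c).any (fun l =>
      match d.get? |l| with
      | some b => (decide (0 < l)) == b
      | none => false)) = true
  · simp [h]
  · have h' : ((PySem.Set.ofList c).any (fun l =>
        match d.get? |l| with
        | some b => (decide (0 < l)) == b
        | none => false)) = false := by simpa using h
    simp [h', PySem.Set.empty]

theorem pv_A_eval (clauses : List (List Int)) (backdoor : List Int) :
    is_backdoor_py clauses backdoor =
      (pvProductBT (pvBl backdoor).length).all (fun vs =>
        ((clauses.all fun c => pvASat (pvDct (pvBl backdoor) vs) c ||
            decide ((pvARest (pvDct (pvBl backdoor) vs) c).length ≤ 2)) ||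
         (clauses.all fun c => pvASat (pvDct (pvBl backdoor) vs) c ||
            decide ((pvARest (pvDct (pvBl backdoor) vs) c).countP (fun l => decide (0 < l)) ≤ 1)))) := by
  unfold is_backdoor_py pvBl pvDct
  refine List.all_congr rfl (fun vs => ?_)
  show (pvDetect2sat (pvSimplify clauses _) || pvDetectHorn (pvSimplify clauses _)) = _
  rw [pv_simplify_eq_filterMap, pv_detectHorn_eq_all]
  unfold pvDetect2sat
  rw [pv_all_filterMap, pv_all_filterMap]
  congr 1
  · exact List.all_congr rfl (fun c => pv_bridge _ c (fun r => decide (r.length ≤ 2)))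
  · exact List.all_congr rfl (fun c =>
      pv_bridge _ c (fun r => decide (r.countP (fun l => decide (0 < l)) ≤ 1)))

theorem pv_altScan_eq (bvars : PySem.Set Int) (cs : List (List Int))
    (ns nh : List (PySem.Set Int)) :
    pvAltScan bvars cs ns nh =
      (ns ++ (cs.filter (fun c => decide (2 < (pvBRest bvars c).length))).map (pvBLits bvars),
       nh ++ (cs.filter (fun c =>
         decide (1 < (pvBRest bvars c).countP (fun l => decide (0 < l))))).map (pvBLits bvars)) := by
  induction cs generalizing ns nh with
  | nil => simp [pvAltScan]
  | cons c rest ih =>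
    rw [pvAltScan]
    rw [ih]
    by_cases h1 : 2 < (pvBRest bvars c).length <;>
      by_cases h2 : 1 < (pvBRest bvars c).countP (fun l => decide (0 < l)) <;>
        simp [h1, h2]

theorem pv_B_eval (clauses : List (List Int)) (backdoor : List Int) :
    is_backdoor_py_alt clauses backdoor =
      !(((clauses.filter (fun c =>
           decide (2 < (pvBRest (PySem.Set.ofList backdoor) c).length))).map
             (pvBLits (PySem.Set.ofList backdoor))).any (fun s1 =>
        ((clauses.filter (fun c =>
           decide (1 < (pvBRest (PySem.Set.ofList backdoor) c).countP (fun l => decide (0 < l))))).map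
             (pvBLits (PySem.Set.ofList backdoor))).any (fun s2 =>
          pvConflictFree (PySem.Set.union s1 s2)))) := by
  unfold is_backdoor_py_alt
  show (!(pvAltScan (PySem.Set.ofList backdoor) clauses [] []).1.any fun s1 =>
      (pvAltScan (PySem.Set.ofList backdoor) clauses [] []).2.any fun s2 =>
        pvConflictFree (s1.union s2)) = _
  rw [pv_altScan_eq]
  simp

-- the keys of dict(zip(bl, vs)) are bl, and lookups read off vs
theorem pv_zip_items (bl : List Int) (vs : List Bool) (hbl : bl.Nodup)
    (hlen : vs.length = bl.length) :
    (pvDct bl vs).items = bl.zip vs := by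
  have h := PySem.Dict.items_foldl_insert_fresh (bl.zip vs)
    (fun p => p.1) (fun p => p.2) (PySem.Dict.empty)
    (by intro a _; simp [PySem.Dict.contains_empty])
    (by rw [List.map_fst_zip (l₁ := bl) (l₂ := vs) (by omega)]; exact hbl)
  simpa [pvDct] using h

theorem pv_zip_keys (bl : List Int) (vs : List Bool) (hbl : bl.Nodup)
    (hlen : vs.length = bl.length) :
    (pvDct bl vs).keys = bl := by
  simp only [PySem.Dict.keys, pv_zip_items bl vs hbl hlen]
  exact List.map_fst_zip (l₁ := bl) (l₂ := vs) (by omega)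

theorem pv_dget_eq (bl : List Int) (vs : List Bool) (hbl : bl.Nodup)
    (hlen : vs.length = bl.length) (j : Nat) (hj : j < bl.length) (hj2 : j < vs.length) :
    (pvDct bl vs).get? bl[j] = some vs[j] := by
  rw [PySem.Dict.get?_eq_some_iff_mem_items _ _ _
    (by rw [pv_zip_keys bl vs hbl hlen]; exact hbl), pv_zip_items bl vs hbl hlen]
  have hlt : j < (bl.zip vs).length := by simp [List.length_zip]; omega
  have := List.getElem_zip (l := bl) (l' := vs) (i := j) (h := hlt)
  rw [← this]
  exact List.getElem_mem hlt

theorem pv_dget_none (bl : List Int) (vs : List Bool) (hbl : bl.Nodup)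
    (hlen : vs.length = bl.length) (v : Int) (hv : v ∉ bl) :
    (pvDct bl vs).get? v = none := by
  rw [PySem.Dict.get?_eq_none_iff_not_mem_keys, pv_zip_keys bl vs hbl hlen]
  exact hv

theorem pv_bl_nodup (backdoor : List Int) : (pvBl backdoor).Nodup :=
  (PySem.List.sorted_perm _ _ _).nodup_iff.mpr (PySem.Set.nodup_ofList backdoor)

theorem pv_mem_bl (backdoor : List Int) (v : Int) :
    v ∈ pvBl backdoor ↔ v ∈ PySem.Set.ofList backdoor := by
  unfold pvBl
  exact PySem.List.mem_sorted _ _ _ v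

theorem pv_contains_eq (backdoor : List Int) (vs : List Bool)
    (hlen : vs.length = (pvBl backdoor).length) (v : Int) :
    (pvDct (pvBl backdoor) vs).contains v = (PySem.Set.ofList backdoor).contains v := by
  have hk := pv_zip_keys (pvBl backdoor) vs (pv_bl_nodup backdoor) hlen
  by_cases h : v ∈ PySem.Set.ofList backdoor
  · have h1 : (pvDct (pvBl backdoor) vs).contains v = true :=
      (PySem.Dict.contains_iff_mem_keys _ _).mpr (by rw [hk]; exact (pv_mem_bl backdoor v).mpr h)
    rw [h1, (PySem.Set.contains_iff _ _).mpr h]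
  · have h1 : (pvDct (pvBl backdoor) vs).contains v = false := by
      cases hc : (pvDct (pvBl backdoor) vs).contains v
      · rfl
      · exact absurd ((pv_mem_bl backdoor v).mp (hk ▸ (PySem.Dict.contains_iff_mem_keys _ _).mp hc)) h
    have h2 : (PySem.Set.ofList backdoor).contains v = false := by
      cases hc : (PySem.Set.ofList backdoor).contains v
      · rfl
      · exact absurd ((PySem.Set.contains_iff _ _).mp hc) h
    rw [h1, h2]

theorem pv_rest_eq (backdoor : List Int) (vs : List Bool)
    (hlen : vs.length = (pvBl backdoor).length) (c : List Int) :
    pvARest (pvDct (pvBl backdoor) vs) c = pvBRest (PySem.Set.ofList backdoor) c := by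
  unfold pvARest pvBRest
  exact List.filter_congr (fun l _ => by rw [pv_contains_eq backdoor vs hlen |l|])

theorem pv_contains_true (s : PySem.Set Int) (x : Int) (h : x ∈ s) :
    PySem.Set.contains s x = true := (PySem.Set.contains_iff s x).mpr h

theorem pv_contains_false (s : PySem.Set Int) (x : Int) (h : x ∉ s) :
    PySem.Set.contains s x = false := by
  cases hc : PySem.Set.contains s x
  · rfl
  · exact absurd ((PySem.Set.contains_iff s x).mp hc) h

theorem pv_CF_iff (u : PySem.Set Int) :
    pvConflictFree u = true ↔ ∀ l ∈ u, l ≠ 0 → (-l) ∉ u := by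
  unfold pvConflictFree
  rw [List.all_eq_true]
  constructor
  · intro h l hl hl0 hneg
    have := h l hl
    rw [pv_contains_true u (-l) hneg] at this
    simp at this
    exact hl0 this
  · intro h l hl
    by_cases hl0 : l = 0
    · simp [hl0]
    · rw [pv_contains_false u (-l) (h l hl hl0)]
      simp

theorem pv_falsify (u : PySem.Set Int) (hCF : pvConflictFree u = true) (l : Int) (hl : l ∈ u) :
    pvAssignFor u |l| ≠ decide (0 < l) := by
  have hCF' := (pv_CF_iff u).mp hCF
  unfold pvAssignFor
  rcases lt_trichotomy l 0 with hneg | rfl | hpos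
  · have habs : |l| = -l := abs_of_neg hneg
    have hnc : PySem.Set.contains u (-l) = false :=
      pv_contains_false u (-l) (hCF' l hl (by omega))
    rw [habs, hnc]
    simp only [Bool.false_eq_true, if_false, neg_neg, pv_contains_true u l hl, if_true]
    intro hEq
    have : 0 < l := by simpa using hEq.symm
    omega
  · rw [abs_zero, pv_contains_true u 0 hl, if_pos rfl]
    simp
  · have habs : |l| = l := abs_of_pos hpos
    have h1 : (l == 0) = false := by simp; omega
    have h2 : decide (0 < l) = true := by simp [hpos]
    rw [habs, pv_contains_true u l hl]
    simp only [if_true, h1, h2]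
    simp

theorem pv_aSat_false (backdoor : List Int) (u : PySem.Set Int)
    (hCF : pvConflictFree u = true) (c : List Int)
    (hmem : ∀ l ∈ PySem.Set.ofList c, |l| ∈ pvBl backdoor → l ∈ u) :
    pvASat (pvDct (pvBl backdoor) ((pvBl backdoor).map (pvAssignFor u))) c = false := by
  unfold pvASat
  rw [List.any_eq_false]
  intro l hlc
  by_cases hmemb : |l| ∈ pvBl backdoor
  · obtain ⟨j, hj, hget⟩ := List.mem_iff_getElem.mp hmemb
    have hlen : ((pvBl backdoor).map (pvAssignFor u)).length = (pvBl backdoor).length := by simp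
    have hget2 := pv_dget_eq (pvBl backdoor) _ (pv_bl_nodup backdoor) hlen j hj (by simp [hj])
    rw [hget] at hget2
    have hv : ((pvBl backdoor).map (pvAssignFor u))[j]'(by simp [hj]) =
        pvAssignFor u ((pvBl backdoor)[j]) := List.getElem_map _
    rw [hv, hget] at hget2
    rw [hget2]
    have hne := pv_falsify u hCF l (hmem l hlc hmemb)
    simp only [Bool.not_eq_true]
    cases h1 : decide (0 < l) <;> cases h2 : pvAssignFor u |l| <;> simp_all
  · rw [pv_dget_none (pvBl backdoor) _ (pv_bl_nodup backdoor) (by simp) |l| hmemb]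
    simp

theorem pv_sat_witness (backdoor : List Int) (vs : List Bool)
    (hlen : vs.length = (pvBl backdoor).length) (c : List Int) (l : Int)
    (hsat : pvASat (pvDct (pvBl backdoor) vs) c = false)
    (hlc : l ∈ PySem.Set.ofList c) (hb : |l| ∈ pvBl backdoor) :
    ∃ b, (pvDct (pvBl backdoor) vs).get? |l| = some b ∧ decide (0 < l) ≠ b := by
  obtain ⟨j, hj, hget⟩ := List.mem_iff_getElem.mp hb
  have hget2 := pv_dget_eq (pvBl backdoor) vs (pv_bl_nodup backdoor) hlen j hj (by omega)
  rw [hget] at hget2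
  unfold pvASat at hsat
  rw [List.any_eq_false] at hsat
  have h := hsat l hlc
  rw [hget2] at h
  simp only [Bool.not_eq_true] at h
  exact ⟨vs[j]'(by omega), hget2, by
    intro he
    rw [← he] at h
    simp at h⟩

theorem pv_blits_mem (bv : PySem.Set Int) (c : List Int) (l : Int) :
    l ∈ pvBLits bv c ↔ l ∈ PySem.Set.ofList c ∧ bv.contains |l| = true := by
  unfold pvBLits
  rw [PySem.Set.mem_ofList, List.mem_filter]

theorem pv_mem_bl_contains (backdoor : List Int) (v : Int) :
    v ∈ pvBl backdoor ↔ (PySem.Set.ofList backdoor).contains v = true := by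
  rw [pv_mem_bl, PySem.Set.contains_iff]

-- ===== VERDICT (by name: the statement is the Claim_ definition above) =====
theorem is_backdoor_py_spec : Claim_equal_is_backdoor_py := by
  intro clauses backdoor _dom
  unfold Spec_is_backdoor_py
  rw [pv_A_eval, pv_B_eval]
  cases hX : (((clauses.filter (fun c =>
           decide (2 < (pvBRest (PySem.Set.ofList backdoor) c).length))).map
             (pvBLits (PySem.Set.ofList backdoor))).any (fun s1 =>
        ((clauses.filter (fun c =>
           decide (1 < (pvBRest (PySem.Set.ofList backdoor) c).countP (fun l => decide (0 < l))))).map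
             (pvBLits (PySem.Set.ofList backdoor))).any (fun s2 =>
          pvConflictFree (PySem.Set.union s1 s2)))) with
  | true =>
    simp only [Bool.not_true]
    rw [List.all_eq_false]
    -- unpack the failing pair of clauses
    rw [List.any_eq_true] at hX
    obtain ⟨s1, hs1, hinner⟩ := hX
    rw [List.any_eq_true] at hinner
    obtain ⟨s2, hs2, hCF⟩ := hinner
    rw [List.mem_map] at hs1 hs2
    obtain ⟨c1, hc1f, rfl⟩ := hs1
    obtain ⟨c2, hc2f, rfl⟩ := hs2
    rw [List.mem_filter] at hc1f hc2f
    obtain ⟨hc1m, hc1len⟩ := hc1f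
    obtain ⟨hc2m, hc2cnt⟩ := hc2f
    set u := PySem.Set.union (pvBLits (PySem.Set.ofList backdoor) c1)
      (pvBLits (PySem.Set.ofList backdoor) c2) with hu
    refine ⟨(pvBl backdoor).map (pvAssignFor u), (pv_mem_productBT _ _).mpr (by simp), ?_⟩
    have hlen : ((pvBl backdoor).map (pvAssignFor u)).length = (pvBl backdoor).length := by simp
    have hm1 : ∀ l ∈ PySem.Set.ofList c1, |l| ∈ pvBl backdoor → l ∈ u := by
      intro l hl hb
      rw [hu, PySem.Set.mem_union]
      exact Or.inl ((pv_blits_mem _ c1 l).mpr ⟨hl, (pv_mem_bl_contains backdoor |l|).mp hb⟩)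
    have hm2 : ∀ l ∈ PySem.Set.ofList c2, |l| ∈ pvBl backdoor → l ∈ u := by
      intro l hl hb
      rw [hu, PySem.Set.mem_union]
      exact Or.inr ((pv_blits_mem _ c2 l).mpr ⟨hl, (pv_mem_bl_contains backdoor |l|).mp hb⟩)
    simp only [Bool.not_eq_true, Bool.or_eq_false_iff]
    constructor
    · rw [List.all_eq_false]
      refine ⟨c1, hc1m, ?_⟩
      simp only [Bool.not_eq_true, Bool.or_eq_false_iff]
      refine ⟨pv_aSat_false backdoor u hCF c1 hm1, ?_⟩
      rw [pv_rest_eq backdoor _ hlen c1]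
      simp only [decide_eq_true_eq] at hc1len
      simp
      omega
    · rw [List.all_eq_false]
      refine ⟨c2, hc2m, ?_⟩
      simp only [Bool.not_eq_true, Bool.or_eq_false_iff]
      refine ⟨pv_aSat_false backdoor u hCF c2 hm2, ?_⟩
      rw [pv_rest_eq backdoor _ hlen c2]
      simp only [decide_eq_true_eq] at hc2cnt
      simp
      omega
  | false =>
    simp only [Bool.not_false]
    rw [List.all_eq_true]
    intro vs hvs
    have hlen : vs.length = (pvBl backdoor).length := (pv_mem_productBT _ vs).mp hvs
    by_contra hP
    simp only [Bool.not_eq_true, Bool.or_eq_false_iff] at hP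
    obtain ⟨hA1, hA2⟩ := hP
    rw [List.all_eq_false] at hA1 hA2
    obtain ⟨c1, hc1m, hp1⟩ := hA1
    obtain ⟨c2, hc2m, hp2⟩ := hA2
    simp only [Bool.not_eq_true, Bool.or_eq_false_iff] at hp1 hp2
    obtain ⟨hsat1, hlen1⟩ := hp1
    obtain ⟨hsat2, hcnt2⟩ := hp2
    rw [pv_rest_eq backdoor vs hlen c1] at hlen1
    rw [pv_rest_eq backdoor vs hlen c2] at hcnt2
    -- build the contradiction with hX = false
    have hXtrue : (((clauses.filter (fun c =>
           decide (2 < (pvBRest (PySem.Set.ofList backdoor) c).length))).map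
             (pvBLits (PySem.Set.ofList backdoor))).any (fun s1 =>
        ((clauses.filter (fun c =>
           decide (1 < (pvBRest (PySem.Set.ofList backdoor) c).countP (fun l => decide (0 < l))))).map
             (pvBLits (PySem.Set.ofList backdoor))).any (fun s2 =>
          pvConflictFree (PySem.Set.union s1 s2)))) = true := by
      rw [List.any_eq_true]
      refine ⟨pvBLits (PySem.Set.ofList backdoor) c1,
        List.mem_map.mpr ⟨c1, List.mem_filter.mpr ⟨hc1m, by
          simp only [decide_eq_true_eq]
          simp only [decide_eq_false_iff_not] at hlen1
          omega⟩, rfl⟩, ?_⟩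
      rw [List.any_eq_true]
      refine ⟨pvBLits (PySem.Set.ofList backdoor) c2,
        List.mem_map.mpr ⟨c2, List.mem_filter.mpr ⟨hc2m, by
          simp only [decide_eq_true_eq]
          simp only [decide_eq_false_iff_not] at hcnt2
          omega⟩, rfl⟩, ?_⟩
      rw [pv_CF_iff]
      intro l hlu hl0 hneg
      -- both l and -l are falsified backdoor literals under vs: contradiction
      have habs : |(-l)| = |l| := abs_neg l
      have hmsplit : ∀ x, x ∈ PySem.Set.union (pvBLits (PySem.Set.ofList backdoor) c1)
          (pvBLits (PySem.Set.ofList backdoor) c2) →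
          ∃ b, (pvDct (pvBl backdoor) vs).get? |x| = some b ∧ decide (0 < x) ≠ b := by
        intro x hx
        rw [PySem.Set.mem_union] at hx
        rcases hx with hx | hx
        · obtain ⟨hxc, hxb⟩ := (pv_blits_mem _ c1 x).mp hx
          exact pv_sat_witness backdoor vs hlen c1 x hsat1 hxc
            ((pv_mem_bl_contains backdoor |x|).mpr hxb)
        · obtain ⟨hxc, hxb⟩ := (pv_blits_mem _ c2 x).mp hx
          exact pv_sat_witness backdoor vs hlen c2 x hsat2 hxc
            ((pv_mem_bl_contains backdoor |x|).mpr hxb)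
      obtain ⟨b1, hg1, hne1⟩ := hmsplit l hlu
      obtain ⟨b2, hg2, hne2⟩ := hmsplit (-l) hneg
      rw [habs, hg1] at hg2
      have hbb : b1 = b2 := by injection hg2
      subst hbb
      rcases lt_trichotomy l 0 with h | h | h
      · have e1 : decide (0 < l) = false := by simp; omega
        have e2 : decide (0 < -l) = true := by simp; omega
        rw [e1] at hne1; rw [e2] at hne2
        cases b1 <;> simp_all
      · exact hl0 h
      · have e1 : decide (0 < l) = true := by simp; omega
        have e2 : decide (0 < -l) = false := by simp; omega
        rw [e1] at hne1; rw [e2] at hne2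
        cases b1 <;> simp_all
    rw [hXtrue] at hX
    exact absurd hX (by simp)
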